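-- pv_equiv track=rewrite | github.com/rossanata/Brickwork_DevCamp | Brickwork.py | visualize_layer
-- ===== SOURCE A (Python) =====
-- def visualize_layer(layer):
--     # Size of temp_layer
--     temp_layer_row = len(layer) * 2 + 1
--     temp_layer_col = len(layer[0]) * 7 + 1
--     # Create temp_layer (multidimensional list) of emtpy spaces - ' '
--     temp_layer = [[' ' for _ in range(temp_layer_col)] for _ in range(temp_layer_row)]
--
--     for row in range(len(layer)):
--         for col in range(len(layer[0])):
--             # Upper separator of cell
--             #      ------ ------ ------ ------
--             #         1      2      2      3
--             #             ------ ------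
--             #         1      4      4      3
--             #
--             if row == 0 or layer[row][col] != layer[row - 1][col]:
--                 for i in range(1, 7):
--                     temp_layer[2 * row][7 * col + i] = '-'
--
--             # Bottom separator of cell
--             #
--             #         1      2      2      3
--             #             ------ ------
--             #         1      4      4      3
--             #      ------ ------ ------ ------
--             if row == len(layer) - 1 or layer[row][col] != layer[row + 1][col]:
--                 for i in range(1, 7):
--                     temp_layer[2 * row + 2][7 * col + i] = '-'
--
--             # Left separator of cell
--             # If first column cell or if neighbouring cell on the left is different -> left separator of three '*'
--             #     *      *             *
--             #     *   1  *   2      2  *   3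
--             #     *      *             *
--             #     *   1  *   4      4  *   3
--             #     *      *             *
--             if col == 0 or layer[row][col] != layer[row][col - 1]:
--                 for i in range(3):
--                     temp_layer[2 * row + i][7 * col] = '*'
--
--             # # Not first row and column cell -> top left separator '-' if neighbouring cell on the left is the same and
--             # # above two cells form a brick as well
--             #
--             #         1      2      2      3
--             #                   -
--             #         1      4      4      3
--             #
--             if col != 0 and row != 0 and layer[row][col] == layer[row][col - 1] and \
--                     layer[row - 1][col] == layer[row - 1][col - 1]:
--                 temp_layer[2 * row][7 * col] = '-'
--
--             # First row cell -> top left separator '-' if neighbouring cell on the left is the same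
--             #                   -
--             #         1      2      2      3
--             #
--             #         1      4      4      3
--             #
--             if col != 0 and row == 0 and layer[row][col] == layer[row][col - 1]:
--                 temp_layer[0][7 * col] = '-'
--
--             # Last row cell -> bottom left separator '-' if neighbouring cell on the left is the same
--             #
--             #         1      2      2      3
--             #
--             #         1      4      4      3
--             #                   -
--             if col != 0 and row == len(layer) - 1 and layer[row][col] == layer[row][col - 1]:
--                 temp_layer[len(layer) * 2][7 * col] = '-'
--
--             # Right separator of cell - only right border of entire layout needs to be covered as the rest is covered by
--             # left separator
--             #                                 *
--             #         1      2      2      3  *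
--             #                                 *
--             #         1      4      4      3  *
--             #                                 *
--             if col == len(layer[0]) - 1:
--                 for i in range(3):
--                     temp_layer[2 * row + i][7 * col + 7] = '*'
--
--             # Brick numeric value
--             if len(str(layer[row][col])) == 2:
--                 temp_layer[2 * row + 1][7 * col + 3] = str(layer[row][col])[0]
--                 temp_layer[2 * row + 1][7 * col + 4] = str(layer[row][col])[1]
--             else:
--                 temp_layer[2 * row + 1][7 * col + 4] = layer[row][col]
--
--     # Convert multidimensional list - temp_layer to a string.
--     result = ''
--     for i in range(len(temp_layer)):
--         for j in range(len(temp_layer[0])):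
--             result += str(temp_layer[i][j])
--         result += '\n'
--     return result
-- ===== SOURCE B (Python) =====
-- def visualize_layer(layer):
--     n, m = len(layer), len(layer[0])
--     lines = []
--     for r in range(n):
--         # separator line above brick-row r
--         line = ''
--         for c in range(m):
--             if c == 0:
--                 corner = '*'
--             elif r == 0:
--                 corner = '-' if layer[0][c] == layer[0][c - 1] else '*'
--             else:
--                 corner = '-' if (layer[r][c] == layer[r][c - 1]
--                                  and layer[r - 1][c] == layer[r - 1][c - 1]) else '*'
--             fill = '------' if (r == 0 or layer[r][c] != layer[r - 1][c]) else '      '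
--             line += corner + fill
--         lines.append(line + '*')
--         # content line of brick-row r
--         line = ''
--         for c in range(m):
--             corner = '*' if (c == 0 or layer[r][c] != layer[r][c - 1]) else ' '
--             s = str(layer[r][c])
--             mid = '  ' + s + '  ' if len(s) == 2 else '   ' + s + '  '
--             line += corner + mid
--         lines.append(line + '*')
--     # bottom border line
--     line = ''
--     for c in range(m):
--         corner = '*' if (c == 0 or layer[n - 1][c] != layer[n - 1][c - 1]) else '-'
--         line += corner + '------'
--     lines.append(line + '*')
--     return '\n'.join(lines) + '\n'
-- ===== Notes on version B (the rewrite author's own statement) =====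
-- stated objective: faster
-- what changed: B builds the output string line by line (separator line, content line per brick row, then the bottom border) directly from neighbor comparisons, instead of allocating a (2n+1)x(7m+1) character grid, stamping dashes/stars/digits into it cell by cell and then flattening it with character-by-character string concatenation.
-- outside the precondition, e.g. on visualize_layer([[], []]): A returns ' \n \n \n \n \n', B returns '*\n*\n*\n*\n*\n'
import Mathlib
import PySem

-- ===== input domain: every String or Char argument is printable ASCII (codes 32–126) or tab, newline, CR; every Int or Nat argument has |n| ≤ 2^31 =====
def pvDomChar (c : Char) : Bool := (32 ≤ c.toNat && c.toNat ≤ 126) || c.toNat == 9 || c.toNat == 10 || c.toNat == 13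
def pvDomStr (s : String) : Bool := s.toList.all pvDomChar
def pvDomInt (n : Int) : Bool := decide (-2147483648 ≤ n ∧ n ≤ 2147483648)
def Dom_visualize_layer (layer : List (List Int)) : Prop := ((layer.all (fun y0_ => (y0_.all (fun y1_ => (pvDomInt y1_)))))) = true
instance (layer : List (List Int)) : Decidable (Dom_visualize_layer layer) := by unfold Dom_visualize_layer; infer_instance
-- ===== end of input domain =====

-- B renders the layout line by line from neighbor comparisons instead of stamping a 2D char grid and flattening it (objective: faster, constant-factor; measured).

-- ===== PORT A =====
-- layer[r][c]; under Pre_ every access below is in range, so the default is never returned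
def pvAt (layer : List (List Int)) (r c : Nat) : Int := (layer.getD r []).getD c 0

-- one mutation temp_layer[i][j] = v of the 2D list, modeled as an index function (all writes below are in range)
def pvUpd (g : Nat → Nat → List Char) (i j : Nat) (v : List Char) : Nat → Nat → List Char :=
  fun i' j' => if i' = i ∧ j' = j then v else g i' j'

-- the body of A's double loop for cell (row, col), one helper per commented block of the Python
def pvStepTop (layer : List (List Int)) (_n row col : Nat) (g : Nat → Nat → List Char) :
    Nat → Nat → List Char :=
  if row == 0 || pvAt layer row col != pvAt layer (row-1) col then
    (List.range' 1 6).foldl (fun g i => pvUpd g (2*row) (7*col+i) ['-']) g else g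

def pvStepBottom (layer : List (List Int)) (n row col : Nat) (g : Nat → Nat → List Char) :
    Nat → Nat → List Char :=
  if row == n-1 || pvAt layer row col != pvAt layer (row+1) col then
    (List.range' 1 6).foldl (fun g i => pvUpd g (2*row+2) (7*col+i) ['-']) g else g

def pvStepLeft (layer : List (List Int)) (row col : Nat) (g : Nat → Nat → List Char) :
    Nat → Nat → List Char :=
  if col == 0 || pvAt layer row col != pvAt layer row (col-1) then
    (List.range 3).foldl (fun g i => pvUpd g (2*row+i) (7*col) ['*']) g else g

def pvStepTopLeft (layer : List (List Int)) (row col : Nat) (g : Nat → Nat → List Char) :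
    Nat → Nat → List Char :=
  if col != 0 && row != 0 && (pvAt layer row col == pvAt layer row (col-1)) &&
      (pvAt layer (row-1) col == pvAt layer (row-1) (col-1)) then
    pvUpd g (2*row) (7*col) ['-'] else g

def pvStepTopLeft0 (layer : List (List Int)) (row col : Nat) (g : Nat → Nat → List Char) :
    Nat → Nat → List Char :=
  if col != 0 && row == 0 && (pvAt layer row col == pvAt layer row (col-1)) then
    pvUpd g 0 (7*col) ['-'] else g

def pvStepBotLeft (layer : List (List Int)) (n row col : Nat) (g : Nat → Nat → List Char) :
    Nat → Nat → List Char :=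
  if col != 0 && row == n-1 && (pvAt layer row col == pvAt layer row (col-1)) then
    pvUpd g (n*2) (7*col) ['-'] else g

def pvStepRight (_layer : List (List Int)) (m row col : Nat) (g : Nat → Nat → List Char) :
    Nat → Nat → List Char :=
  if col == m-1 then
    (List.range 3).foldl (fun g i => pvUpd g (2*row+i) (7*col+7) ['*']) g else g

-- brick numeric value (Python stores the int itself in the else branch and str()s at join; storing str(v) is exact)
def pvStepValue (layer : List (List Int)) (row col : Nat) (g : Nat → Nat → List Char) :
    Nat → Nat → List Char :=
  let s := PySem.Int.toChars (pvAt layer row col)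
  if s.length == 2 then
    pvUpd (pvUpd g (2*row+1) (7*col+3) [s.getD 0 ' ']) (2*row+1) (7*col+4) [s.getD 1 ' ']
  else
    pvUpd g (2*row+1) (7*col+4) s

def pvCellA (layer : List (List Int)) (n m row col : Nat) (g : Nat → Nat → List Char) :
    Nat → Nat → List Char :=
  pvStepValue layer row col (pvStepRight layer m row col (pvStepBotLeft layer n row col
    (pvStepTopLeft0 layer row col (pvStepTopLeft layer row col (pvStepLeft layer row col
      (pvStepBottom layer n row col (pvStepTop layer n row col g)))))))

def visualize_layer (layer : List (List Int)) : String :=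
  let n := layer.length
  let m := (layer.headD []).length   -- len(layer[0]); Pre_ excludes the empty layer, where Python raises
  let g0 : Nat → Nat → List Char := fun _ _ => [' ']
  let g := (List.range n).foldl (fun g row =>
    (List.range m).foldl (fun g col => pvCellA layer n m row col g) g) g0
  String.ofList ((List.range (2*n+1)).foldl (fun acc i =>
    ((List.range (7*m+1)).foldl (fun acc j => acc ++ g i j) acc) ++ ['\n']) [])

-- ===== PORT B =====
def pvSepLine (layer : List (List Int)) (m r : Nat) : List Char :=
  (List.range m).foldl (fun line c =>
    let corner : List Char :=
      if c == 0 then ['*']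
      else if r == 0 then (if pvAt layer 0 c == pvAt layer 0 (c-1) then ['-'] else ['*'])
      else (if pvAt layer r c == pvAt layer r (c-1) && pvAt layer (r-1) c == pvAt layer (r-1) (c-1)
            then ['-'] else ['*'])
    let fill : List Char :=
      if r == 0 || pvAt layer r c != pvAt layer (r-1) c then "------".toList else "      ".toList
    line ++ corner ++ fill) []

def pvContentLine (layer : List (List Int)) (m r : Nat) : List Char :=
  (List.range m).foldl (fun line c =>
    let corner : List Char :=
      if c == 0 || pvAt layer r c != pvAt layer r (c-1) then ['*'] else [' ']
    let s := PySem.Int.toChars (pvAt layer r c)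
    let mid : List Char :=
      if s.length == 2 then [' ', ' '] ++ s ++ [' ', ' '] else [' ', ' ', ' '] ++ s ++ [' ', ' ']
    line ++ corner ++ mid) []

def pvBottomLine (layer : List (List Int)) (n m : Nat) : List Char :=
  (List.range m).foldl (fun line c =>
    let corner : List Char :=
      if c == 0 || pvAt layer (n-1) c != pvAt layer (n-1) (c-1) then ['*'] else ['-']
    line ++ corner ++ "------".toList) []

def visualize_layer_alt (layer : List (List Int)) : String :=
  let n := layer.length
  let m := (layer.headD []).length
  let lines := (List.range n).foldl (fun ls r =>
      ls ++ [pvSepLine layer m r ++ ['*'], pvContentLine layer m r ++ ['*']]) []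
  let lines := lines ++ [pvBottomLine layer n m ++ ['*']]
  String.ofList (List.intercalate ['\n'] lines ++ ['\n'])   -- '\n'.join(lines) + '\n'

-- ===== PRECONDITION & SPEC =====
-- Pre_ excludes the empty layer and layers with a row shorter than the first (Python raises IndexError there),
-- and layers whose first row is empty, on which A's border-less all-space output is an accident of the column
-- loop never running (B draws the collapsed border there).
def Pre_visualize_layer (layer : List (List Int)) : Prop :=
  layer ≠ [] ∧ 1 ≤ (layer.headD []).length ∧ ∀ row ∈ layer, (layer.headD []).length ≤ row.length
instance (layer : List (List Int)) : Decidable (Pre_visualize_layer layer) := by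
  unfold Pre_visualize_layer; infer_instance

def pvWitness_visualize_layer : List (List Int) := [[1, 1, 2], [3, 1, 1]]

def Spec_visualize_layer (layer : List (List Int)) (out : String) : Prop := out = visualize_layer_alt layer
instance (layer : List (List Int)) (out : String) : Decidable (Spec_visualize_layer layer out) := by
  unfold Spec_visualize_layer; infer_instance

-- ===== CLAIM (what is proved, stated in full; the proofs are below) =====
def Claim_equal_visualize_layer : Prop := ∀ (layer : List (List Int)), Dom_visualize_layer layer → Pre_visualize_layer layer → Spec_visualize_layer layer (visualize_layer layer)

-- ===== LEMMAS AND PROOFS =====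

-- the canonical character(s) at text position (i, j) of the rendered layout
def pvE (layer : List (List Int)) (n m i j : Nat) : List Char :=
  let r := i / 2
  let c := j / 7
  if j = 7*m then ['*']
  else if i % 2 = 0 then
    if j % 7 = 0 then
      if c = 0 then ['*']
      else if r = 0 then (if pvAt layer 0 c = pvAt layer 0 (c-1) then ['-'] else ['*'])
      else if r = n then (if pvAt layer (n-1) c = pvAt layer (n-1) (c-1) then ['-'] else ['*'])
      else if pvAt layer r c = pvAt layer r (c-1) ∧ pvAt layer (r-1) c = pvAt layer (r-1) (c-1)
           then ['-'] else ['*']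
    else
      if r = 0 ∨ r = n then ['-']
      else if pvAt layer r c = pvAt layer (r-1) c then [' '] else ['-']
  else
    if j % 7 = 0 then
      if c = 0 ∨ pvAt layer r c ≠ pvAt layer r (c-1) then ['*'] else [' ']
    else if j % 7 = 3 then
      (if (PySem.Int.toChars (pvAt layer r c)).length = 2
       then [(PySem.Int.toChars (pvAt layer r c)).getD 0 ' '] else [' '])
    else if j % 7 = 4 then
      (if (PySem.Int.toChars (pvAt layer r c)).length = 2
       then [(PySem.Int.toChars (pvAt layer r c)).getD 1 ' '] else PySem.Int.toChars (pvAt layer r c))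
    else [' ']

-- "cell (r, c) of A's double loop writes text position (i, j)"
def pvHC (layer : List (List Int)) (n m r c i j : Nat) : Prop :=
  (((((((((r = 0 ∨ pvAt layer r c ≠ pvAt layer (r-1) c) ∧ i = 2*r ∧ 7*c+1 ≤ j ∧ j ≤ 7*c+6)
  ∨ ((r = n-1 ∨ pvAt layer r c ≠ pvAt layer (r+1) c) ∧ i = 2*r+2 ∧ 7*c+1 ≤ j ∧ j ≤ 7*c+6))
  ∨ ((c = 0 ∨ pvAt layer r c ≠ pvAt layer r (c-1)) ∧ (2*r ≤ i ∧ i ≤ 2*r+2) ∧ j = 7*c))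
  ∨ (c ≠ 0 ∧ r ≠ 0 ∧ pvAt layer r c = pvAt layer r (c-1) ∧ pvAt layer (r-1) c = pvAt layer (r-1) (c-1) ∧ i = 2*r ∧ j = 7*c))
  ∨ (c ≠ 0 ∧ r = 0 ∧ pvAt layer r c = pvAt layer r (c-1) ∧ i = 0 ∧ j = 7*c))
  ∨ (c ≠ 0 ∧ r = n-1 ∧ pvAt layer r c = pvAt layer r (c-1) ∧ i = n*2 ∧ j = 7*c))
  ∨ (c = m-1 ∧ (2*r ≤ i ∧ i ≤ 2*r+2) ∧ j = 7*c+7))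
  ∨ (((PySem.Int.toChars (pvAt layer r c)).length = 2 ∧ i = 2*r+1 ∧ (j = 7*c+3 ∨ j = 7*c+4))
  ∨ ((PySem.Int.toChars (pvAt layer r c)).length ≠ 2 ∧ i = 2*r+1 ∧ j = 7*c+4)))

-- "S writes e at (i, j) exactly when P holds, and leaves (i, j) alone otherwise"
def pvWrites (S : (Nat → Nat → List Char) → (Nat → Nat → List Char)) (P : Prop)
    (e : List Char) (i j : Nat) : Prop :=
  (∀ g, P → S g i j = e) ∧ (∀ g, ¬ P → S g i j = g i j)

theorem pvWrites_comp {S T : (Nat → Nat → List Char) → (Nat → Nat → List Char)} {P Q : Prop}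
    {e : List Char} {i j : Nat} (hS : pvWrites S P e i j) (hT : pvWrites T Q e i j) :
    pvWrites (fun g => T (S g)) (P ∨ Q) e i j := by
  constructor
  · intro g hPQ
    show T (S g) i j = e
    by_cases hQ : Q
    · exact hT.1 _ hQ
    · rcases hPQ with hP | hQ'
      · rw [hT.2 _ hQ]; exact hS.1 _ hP
      · exact absurd hQ' hQ
  · intro g hPQ
    rw [not_or] at hPQ
    show T (S g) i j = g i j
    rw [hT.2 _ hPQ.2]; exact hS.2 _ hPQ.1

theorem pvUpd_self (g : Nat → Nat → List Char) (i j : Nat) (v : List Char) :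
    pvUpd g i j v i j = v := by
  simp [pvUpd]

theorem pvUpd_ne (g : Nat → Nat → List Char) {i j i' j' : Nat} (v : List Char)
    (h : ¬ (i' = i ∧ j' = j)) : pvUpd g i j v i' j' = g i' j' := by
  simp only [pvUpd]; exact if_neg h

theorem pvfoldl_upd_miss {L : List Nat} {f h : Nat → Nat} {v : List Char} {i j : Nat}
    (hx : ∀ k ∈ L, ¬ (i = f k ∧ j = h k)) (g : Nat → Nat → List Char) :
    (L.foldl (fun g k => pvUpd g (f k) (h k) v) g) i j = g i j := by
  induction L generalizing g with
  | nil => rfl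
  | cons a L ih =>
    rw [List.foldl_cons, ih (fun k hk => hx k (List.mem_cons_of_mem _ hk))]
    exact if_neg (hx a List.mem_cons_self)

theorem pvfoldl_upd_hit {L : List Nat} {f h : Nat → Nat} {v : List Char} {i j : Nat}
    (hx : ∃ k ∈ L, i = f k ∧ j = h k) (g : Nat → Nat → List Char) :
    (L.foldl (fun g k => pvUpd g (f k) (h k) v) g) i j = v := by
  induction L generalizing g with
  | nil => exact absurd hx (by simp)
  | cons a L ih =>
    rw [List.foldl_cons]
    by_cases hL : ∃ k ∈ L, i = f k ∧ j = h k
    · exact ih hL _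
    · rcases hx with ⟨k, hk, hkey⟩
      rcases List.mem_cons.mp hk with rfl | hk'
      · rw [pvfoldl_upd_miss (by simpa using hL)]
        exact if_pos hkey
      · exact absurd ⟨k, hk', hkey⟩ hL

theorem pvWrites_fold {layer : List (List Int)} {n m : Nat} {i j : Nat}
    (body : Nat → (Nat → Nat → List Char) → (Nat → Nat → List Char))
    (H : Nat → Prop) {L : List Nat}
    (hstep : ∀ c ∈ L, pvWrites (body c) (H c) (pvE layer n m i j) i j) :
    pvWrites (fun g => L.foldl (fun g c => body c g) g) (∃ c ∈ L, H c) (pvE layer n m i j) i j := by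
  induction L with
  | nil =>
    constructor
    · intro g hP; exact absurd hP (by simp)
    · intro g _; rfl
  | cons a L ih =>
    have h1 := hstep a List.mem_cons_self
    have h2 := ih (fun c hc => hstep c (List.mem_cons_of_mem _ hc))
    have h3 := pvWrites_comp h1 h2
    constructor
    · intro g hP
      refine (h3.1 g ?_)
      rcases hP with ⟨c, hc, hHc⟩
      rcases List.mem_cons.mp hc with rfl | hc'
      · exact Or.inl hHc
      · exact Or.inr ⟨c, hc', hHc⟩
    · intro g hP
      refine (h3.2 g ?_)
      rintro (h | ⟨c, hc, hHc⟩)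
      · exact hP ⟨a, List.mem_cons_self, h⟩
      · exact hP ⟨c, List.mem_cons_of_mem _ hc, hHc⟩

-- pvE evaluation lemmas
theorem pvE_border (layer : List (List Int)) (n m i : Nat) :
    pvE layer n m i (7*m) = ['*'] := by
  simp [pvE]

theorem pvE_even_fill (layer : List (List Int)) (n m r c k : Nat) (hk1 : 1 ≤ k) (hk6 : k ≤ 6) :
    pvE layer n m (2*r) (7*c+k)
      = if r = 0 ∨ r = n then ['-']
        else if pvAt layer r c = pvAt layer (r-1) c then [' '] else ['-'] := by
  have h1 : 7*c+k ≠ 7*m := by omega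
  have h2 : (2*r) % 2 = 0 := by omega
  have h3 : (7*c+k) % 7 = k := by omega
  have h4 : k ≠ 0 := by omega
  have h5 : (2*r) / 2 = r := by omega
  have h6 : (7*c+k) / 7 = c := by omega
  simp [pvE, h1, h2, h3, h4, h5, h6]

theorem pvE_even_corner (layer : List (List Int)) (n m r c : Nat) (hc : c < m) :
    pvE layer n m (2*r) (7*c)
      = if c = 0 then ['*']
        else if r = 0 then (if pvAt layer 0 c = pvAt layer 0 (c-1) then ['-'] else ['*'])
        else if r = n then (if pvAt layer (n-1) c = pvAt layer (n-1) (c-1) then ['-'] else ['*'])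
        else if pvAt layer r c = pvAt layer r (c-1) ∧ pvAt layer (r-1) c = pvAt layer (r-1) (c-1)
             then ['-'] else ['*'] := by
  have h1 : 7*c ≠ 7*m := by omega
  have h2 : (2*r) % 2 = 0 := by omega
  have h3 : (7*c) % 7 = 0 := by omega
  have h5 : (2*r) / 2 = r := by omega
  have h6 : (7*c) / 7 = c := by omega
  simp [pvE, h1, h2, h3, h5, h6]

theorem pvE_odd_corner (layer : List (List Int)) (n m r c : Nat) (hc : c < m) :
    pvE layer n m (2*r+1) (7*c)
      = if c = 0 ∨ pvAt layer r c ≠ pvAt layer r (c-1) then ['*'] else [' '] := by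
  have h1 : 7*c ≠ 7*m := by omega
  have h2 : (2*r+1) % 2 = 1 := by omega
  have h3 : (7*c) % 7 = 0 := by omega
  have h5 : (2*r+1) / 2 = r := by omega
  have h6 : (7*c) / 7 = c := by omega
  simp [pvE, h1, h2, h3, h5, h6]

theorem pvE_odd_3 (layer : List (List Int)) (n m r c : Nat) :
    pvE layer n m (2*r+1) (7*c+3)
      = (if (PySem.Int.toChars (pvAt layer r c)).length = 2
         then [(PySem.Int.toChars (pvAt layer r c)).getD 0 ' '] else [' ']) := by
  have h1 : 7*c+3 ≠ 7*m := by omega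
  have h2 : (2*r+1) % 2 = 1 := by omega
  have h3 : (7*c+3) % 7 = 3 := by omega
  have h5 : (2*r+1) / 2 = r := by omega
  have h6 : (7*c+3) / 7 = c := by omega
  simp [pvE, h1, h2, h3, h5, h6]

theorem pvE_odd_4 (layer : List (List Int)) (n m r c : Nat) :
    pvE layer n m (2*r+1) (7*c+4)
      = (if (PySem.Int.toChars (pvAt layer r c)).length = 2
         then [(PySem.Int.toChars (pvAt layer r c)).getD 1 ' ']
         else PySem.Int.toChars (pvAt layer r c)) := by
  have h1 : 7*c+4 ≠ 7*m := by omega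
  have h2 : (2*r+1) % 2 = 1 := by omega
  have h3 : (7*c+4) % 7 = 4 := by omega
  have h5 : (2*r+1) / 2 = r := by omega
  have h6 : (7*c+4) / 7 = c := by omega
  simp [pvE, h1, h2, h3, h5, h6]

theorem pvE_odd_other (layer : List (List Int)) (n m r c k : Nat)
    (hk1 : 1 ≤ k) (hk6 : k ≤ 6) (hk3 : k ≠ 3) (hk4 : k ≠ 4) :
    pvE layer n m (2*r+1) (7*c+k) = [' '] := by
  have h1 : 7*c+k ≠ 7*m := by omega
  have h2 : (2*r+1) % 2 = 1 := by omega
  have h3 : (7*c+k) % 7 = k := by omega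
  have h4 : k ≠ 0 := by omega
  simp [pvE, h1, h2, h3, h4, hk3, hk4]

-- the eight write statements of A's loop body, each characterized pointwise
theorem pvW1 (layer : List (List Int)) (n m r c i j : Nat) (hr : r < n) :
    pvWrites (pvStepTop layer n r c)
      ((r = 0 ∨ pvAt layer r c ≠ pvAt layer (r-1) c) ∧ i = 2*r ∧ 7*c+1 ≤ j ∧ j ≤ 7*c+6)
      (pvE layer n m i j) i j := by
  unfold pvStepTop
  constructor
  · rintro g ⟨hcond, rfl, hj1, hj2⟩
    have hb : (r == 0 || pvAt layer r c != pvAt layer (r-1) c) = true := by simpa using hcond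
    simp only [if_pos hb]
    rw [pvfoldl_upd_hit ⟨j - 7*c, by rw [List.mem_range'_1]; omega, rfl, by omega⟩]
    rw [show j = 7*c + (j - 7*c) from by omega,
        pvE_even_fill layer n m r c _ (by omega) (by omega)]
    by_cases hr0 : r = 0
    · rw [if_pos (Or.inl hr0)]
    · have hd := hcond.resolve_left hr0
      rw [if_neg (by omega), if_neg hd]
  · intro g hnP
    by_cases hb : (r == 0 || pvAt layer r c != pvAt layer (r-1) c) = true
    · simp only [if_pos hb]
      apply pvfoldl_upd_miss
      intro k hk hkey
      rw [List.mem_range'_1] at hk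
      exact hnP ⟨by simpa using hb, hkey.1, by omega, by omega⟩
    · simp only [if_neg hb]

theorem pvW2 (layer : List (List Int)) (n m r c i j : Nat) (hr : r < n) :
    pvWrites (pvStepBottom layer n r c)
      ((r = n-1 ∨ pvAt layer r c ≠ pvAt layer (r+1) c) ∧ i = 2*r+2 ∧ 7*c+1 ≤ j ∧ j ≤ 7*c+6)
      (pvE layer n m i j) i j := by
  unfold pvStepBottom
  constructor
  · rintro g ⟨hcond, rfl, hj1, hj2⟩
    have hb : (r == n-1 || pvAt layer r c != pvAt layer (r+1) c) = true := by simpa using hcond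
    simp only [if_pos hb]
    rw [pvfoldl_upd_hit ⟨j - 7*c, by rw [List.mem_range'_1]; omega, rfl, by omega⟩]
    rw [show (2*r+2) = 2*(r+1) from by ring,
        show j = 7*c + (j - 7*c) from by omega,
        pvE_even_fill layer n m (r+1) c _ (by omega) (by omega)]
    by_cases hrn : r + 1 = n
    · rw [if_pos (Or.inr hrn)]
    · have hd := hcond.resolve_left (by omega)
      rw [if_neg (by omega), Nat.add_sub_cancel, if_neg (fun h => hd h.symm)]
  · intro g hnP
    by_cases hb : (r == n-1 || pvAt layer r c != pvAt layer (r+1) c) = true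
    · simp only [if_pos hb]
      apply pvfoldl_upd_miss
      intro k hk hkey
      rw [List.mem_range'_1] at hk
      exact hnP ⟨by simpa using hb, hkey.1, by omega, by omega⟩
    · simp only [if_neg hb]

theorem pvW3 (layer : List (List Int)) (n m r c i j : Nat) (hr : r < n) (hc : c < m) :
    pvWrites (pvStepLeft layer r c)
      ((c = 0 ∨ pvAt layer r c ≠ pvAt layer r (c-1)) ∧ (2*r ≤ i ∧ i ≤ 2*r+2) ∧ j = 7*c)
      (pvE layer n m i j) i j := by
  unfold pvStepLeft
  constructor
  · rintro g ⟨hcond, ⟨hi1, hi2⟩, rfl⟩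
    have hb : (c == 0 || pvAt layer r c != pvAt layer r (c-1)) = true := by simpa using hcond
    simp only [if_pos hb]
    rw [pvfoldl_upd_hit ⟨i - 2*r, by rw [List.mem_range]; omega, by omega, rfl⟩]
    have hi3 : i = 2*r ∨ i = 2*r+1 ∨ i = 2*r+2 := by omega
    rcases hi3 with rfl | rfl | rfl
    · rw [pvE_even_corner layer n m r c hc]
      by_cases hc0 : c = 0
      · rw [if_pos hc0]
      · have hd := hcond.resolve_left hc0
        rw [if_neg hc0]
        by_cases hr0 : r = 0
        · subst hr0; rw [if_pos rfl, if_neg hd]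
        · rw [if_neg hr0, if_neg (by omega : ¬ r = n), if_neg (fun h => hd h.1)]
    · rw [pvE_odd_corner layer n m r c hc, if_pos hcond]
    · rw [show (2*r+2) = 2*(r+1) from by ring, pvE_even_corner layer n m (r+1) c hc]
      by_cases hc0 : c = 0
      · rw [if_pos hc0]
      · have hd := hcond.resolve_left hc0
        rw [if_neg hc0, if_neg (by omega : ¬ r + 1 = 0)]
        by_cases hrn : r + 1 = n
        · rw [if_pos hrn, show n - 1 = r from by omega, if_neg hd]
        · rw [if_neg hrn, Nat.add_sub_cancel, if_neg (fun h => hd h.2)]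
  · intro g hnP
    by_cases hb : (c == 0 || pvAt layer r c != pvAt layer r (c-1)) = true
    · simp only [if_pos hb]
      apply pvfoldl_upd_miss
      intro k hk hkey
      rw [List.mem_range] at hk
      exact hnP ⟨by simpa using hb, by omega, hkey.2⟩
    · simp only [if_neg hb]

theorem pvW4 (layer : List (List Int)) (n m r c i j : Nat) (hr : r < n) (hc : c < m) :
    pvWrites (pvStepTopLeft layer r c)
      (c ≠ 0 ∧ r ≠ 0 ∧ pvAt layer r c = pvAt layer r (c-1) ∧
        pvAt layer (r-1) c = pvAt layer (r-1) (c-1) ∧ i = 2*r ∧ j = 7*c)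
      (pvE layer n m i j) i j := by
  unfold pvStepTopLeft
  constructor
  · rintro g ⟨hc0, hr0, he1, he2, rfl, rfl⟩
    have hb : (c != 0 && r != 0 && (pvAt layer r c == pvAt layer r (c-1)) &&
        (pvAt layer (r-1) c == pvAt layer (r-1) (c-1))) = true := by
      simp [hc0, hr0, he1, he2]
    simp only [if_pos hb]
    rw [pvUpd_self, pvE_even_corner layer n m r c hc, if_neg hc0, if_neg hr0,
        if_neg (by omega : ¬ r = n), if_pos ⟨he1, he2⟩]
  · intro g hnP
    by_cases hb : (c != 0 && r != 0 && (pvAt layer r c == pvAt layer r (c-1)) &&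
        (pvAt layer (r-1) c == pvAt layer (r-1) (c-1))) = true
    · simp only [if_pos hb]
      refine pvUpd_ne g _ (fun hk => ?_)
      simp only [Bool.and_eq_true, bne_iff_ne, beq_iff_eq, ne_eq] at hb
      exact hnP ⟨hb.1.1.1, hb.1.1.2, hb.1.2, hb.2, hk.1, hk.2⟩
    · simp only [if_neg hb]

theorem pvW5 (layer : List (List Int)) (n m r c i j : Nat) (hc : c < m) :
    pvWrites (pvStepTopLeft0 layer r c)
      (c ≠ 0 ∧ r = 0 ∧ pvAt layer r c = pvAt layer r (c-1) ∧ i = 0 ∧ j = 7*c)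
      (pvE layer n m i j) i j := by
  unfold pvStepTopLeft0
  constructor
  · rintro g ⟨hc0, rfl, he1, rfl, rfl⟩
    have hb : (c != 0 && 0 == 0 && (pvAt layer 0 c == pvAt layer 0 (c-1))) = true := by
      simp [hc0, he1]
    simp only [if_pos hb]
    rw [pvUpd_self, show (0:Nat) = 2*0 from rfl, pvE_even_corner layer n m 0 c hc,
        if_neg hc0, if_pos rfl, if_pos he1]
  · intro g hnP
    by_cases hb : (c != 0 && r == 0 && (pvAt layer r c == pvAt layer r (c-1))) = true
    · simp only [if_pos hb]
      refine pvUpd_ne g _ (fun hk => ?_)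
      simp only [Bool.and_eq_true, bne_iff_ne, beq_iff_eq, ne_eq] at hb
      exact hnP ⟨hb.1.1, hb.1.2, hb.2, hk.1, hk.2⟩
    · simp only [if_neg hb]

theorem pvW6 (layer : List (List Int)) (n m r c i j : Nat) (hr : r < n) (hc : c < m) :
    pvWrites (pvStepBotLeft layer n r c)
      (c ≠ 0 ∧ r = n-1 ∧ pvAt layer r c = pvAt layer r (c-1) ∧ i = n*2 ∧ j = 7*c)
      (pvE layer n m i j) i j := by
  unfold pvStepBotLeft
  constructor
  · rintro g ⟨hc0, hrn, he1, rfl, rfl⟩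
    have hb : (c != 0 && r == n-1 && (pvAt layer r c == pvAt layer r (c-1))) = true := by
      simp only [Bool.and_eq_true, bne_iff_ne, beq_iff_eq]
      exact ⟨⟨hc0, hrn⟩, he1⟩
    simp only [if_pos hb]
    rw [pvUpd_self, show n*2 = 2*n from by ring, pvE_even_corner layer n m n c hc,
        if_neg hc0, if_neg (by omega : ¬ n = 0), if_pos rfl,
        if_pos (by rw [← hrn]; exact he1 : pvAt layer (n-1) c = pvAt layer (n-1) (c-1))]
  · intro g hnP
    by_cases hb : (c != 0 && r == n-1 && (pvAt layer r c == pvAt layer r (c-1))) = true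
    · simp only [if_pos hb]
      refine pvUpd_ne g _ (fun hk => ?_)
      simp only [Bool.and_eq_true, bne_iff_ne, beq_iff_eq, ne_eq] at hb
      exact hnP ⟨hb.1.1, hb.1.2, hb.2, hk.1, hk.2⟩
    · simp only [if_neg hb]

theorem pvW7 (layer : List (List Int)) (n m r c i j : Nat) (hc : c < m) :
    pvWrites (pvStepRight layer m r c)
      (c = m-1 ∧ (2*r ≤ i ∧ i ≤ 2*r+2) ∧ j = 7*c+7)
      (pvE layer n m i j) i j := by
  unfold pvStepRight
  constructor
  · rintro g ⟨hcm, ⟨hi1, hi2⟩, rfl⟩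
    have hb : (c == m-1) = true := by simpa using hcm
    simp only [if_pos hb]
    rw [pvfoldl_upd_hit ⟨i - 2*r, by rw [List.mem_range]; omega, by omega, rfl⟩]
    rw [show 7*c+7 = 7*m from by omega, pvE_border]
  · intro g hnP
    by_cases hb : (c == m-1) = true
    · simp only [if_pos hb]
      apply pvfoldl_upd_miss
      intro k hk hkey
      rw [List.mem_range] at hk
      exact hnP ⟨by simpa using hb, by omega, hkey.2⟩
    · simp only [if_neg hb]

theorem pvW8 (layer : List (List Int)) (n m r c i j : Nat) :
    pvWrites (pvStepValue layer r c)
      (((PySem.Int.toChars (pvAt layer r c)).length = 2 ∧ i = 2*r+1 ∧ (j = 7*c+3 ∨ j = 7*c+4))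
        ∨ ((PySem.Int.toChars (pvAt layer r c)).length ≠ 2 ∧ i = 2*r+1 ∧ j = 7*c+4))
      (pvE layer n m i j) i j := by
  unfold pvStepValue
  constructor
  · rintro g (⟨h2, rfl, (rfl | rfl)⟩ | ⟨h2, rfl, rfl⟩)
    · simp only [if_pos (by simpa using h2 : ((PySem.Int.toChars (pvAt layer r c)).length == 2) = true)]
      rw [pvUpd_ne _ _ (by omega), pvUpd_self, pvE_odd_3, if_pos h2]
    · simp only [if_pos (by simpa using h2 : ((PySem.Int.toChars (pvAt layer r c)).length == 2) = true)]
      rw [pvUpd_self, pvE_odd_4, if_pos h2]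
    · simp only [if_neg (by simpa using h2 : ¬ ((PySem.Int.toChars (pvAt layer r c)).length == 2) = true)]
      rw [pvUpd_self, pvE_odd_4, if_neg h2]
  · intro g hnP
    by_cases hb : ((PySem.Int.toChars (pvAt layer r c)).length == 2) = true
    · simp only [if_pos hb]
      rw [pvUpd_ne _ _ (fun hk => hnP (Or.inl ⟨by simpa using hb, hk.1, Or.inr hk.2⟩)),
          pvUpd_ne _ _ (fun hk => hnP (Or.inl ⟨by simpa using hb, hk.1, Or.inl hk.2⟩))]
    · simp only [if_neg hb]
      rw [pvUpd_ne _ _ (fun hk => hnP (Or.inr ⟨by simpa using hb, hk.1, hk.2⟩))]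

theorem pvWrites_cellA (layer : List (List Int)) (n m r c i j : Nat) (hr : r < n) (hc : c < m) :
    pvWrites (pvCellA layer n m r c) (pvHC layer n m r c i j) (pvE layer n m i j) i j := by
  have h :=
    pvWrites_comp (pvWrites_comp (pvWrites_comp (pvWrites_comp (pvWrites_comp (pvWrites_comp
      (pvWrites_comp (pvW1 layer n m r c i j hr) (pvW2 layer n m r c i j hr))
      (pvW3 layer n m r c i j hr hc)) (pvW4 layer n m r c i j hr hc))
      (pvW5 layer n m r c i j hc)) (pvW6 layer n m r c i j hr hc))
      (pvW7 layer n m r c i j hc)) (pvW8 layer n m r c i j)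
  constructor
  · intro g hP
    unfold pvHC at hP
    exact h.1 g hP
  · intro g hP
    unfold pvHC at hP
    exact h.2 g hP


-- constructors for the nine disjuncts of pvHC
theorem pvHC_top (layer : List (List Int)) (n m : Nat) {r c i j : Nat}
    (h : (r = 0 ∨ pvAt layer r c ≠ pvAt layer (r-1) c) ∧ i = 2*r ∧ 7*c+1 ≤ j ∧ j ≤ 7*c+6) :
    pvHC layer n m r c i j := by
  unfold pvHC; exact Or.inl (Or.inl (Or.inl (Or.inl (Or.inl (Or.inl (Or.inl h))))))

theorem pvHC_bottom (layer : List (List Int)) (n m : Nat) {r c i j : Nat}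
    (h : (r = n-1 ∨ pvAt layer r c ≠ pvAt layer (r+1) c) ∧ i = 2*r+2 ∧ 7*c+1 ≤ j ∧ j ≤ 7*c+6) :
    pvHC layer n m r c i j := by
  unfold pvHC; exact Or.inl (Or.inl (Or.inl (Or.inl (Or.inl (Or.inl (Or.inr h))))))

theorem pvHC_left (layer : List (List Int)) (n m : Nat) {r c i j : Nat}
    (h : (c = 0 ∨ pvAt layer r c ≠ pvAt layer r (c-1)) ∧ (2*r ≤ i ∧ i ≤ 2*r+2) ∧ j = 7*c) :
    pvHC layer n m r c i j := by
  unfold pvHC; exact Or.inl (Or.inl (Or.inl (Or.inl (Or.inl (Or.inr h)))))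

theorem pvHC_tl (layer : List (List Int)) (n m : Nat) {r c i j : Nat}
    (h : c ≠ 0 ∧ r ≠ 0 ∧ pvAt layer r c = pvAt layer r (c-1) ∧
      pvAt layer (r-1) c = pvAt layer (r-1) (c-1) ∧ i = 2*r ∧ j = 7*c) :
    pvHC layer n m r c i j := by
  unfold pvHC; exact Or.inl (Or.inl (Or.inl (Or.inl (Or.inr h))))

theorem pvHC_tl0 (layer : List (List Int)) (n m : Nat) {r c i j : Nat}
    (h : c ≠ 0 ∧ r = 0 ∧ pvAt layer r c = pvAt layer r (c-1) ∧ i = 0 ∧ j = 7*c) :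
    pvHC layer n m r c i j := by
  unfold pvHC; exact Or.inl (Or.inl (Or.inl (Or.inr h)))

theorem pvHC_bl (layer : List (List Int)) (n m : Nat) {r c i j : Nat}
    (h : c ≠ 0 ∧ r = n-1 ∧ pvAt layer r c = pvAt layer r (c-1) ∧ i = n*2 ∧ j = 7*c) :
    pvHC layer n m r c i j := by
  unfold pvHC; exact Or.inl (Or.inl (Or.inr h))

theorem pvHC_right (layer : List (List Int)) (n m : Nat) {r c i j : Nat}
    (h : c = m-1 ∧ (2*r ≤ i ∧ i ≤ 2*r+2) ∧ j = 7*c+7) :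
    pvHC layer n m r c i j := by
  unfold pvHC; exact Or.inl (Or.inr h)

theorem pvHC_val2 (layer : List (List Int)) (n m : Nat) {r c i j : Nat}
    (h : (PySem.Int.toChars (pvAt layer r c)).length = 2 ∧ i = 2*r+1 ∧ (j = 7*c+3 ∨ j = 7*c+4)) :
    pvHC layer n m r c i j := by
  unfold pvHC; exact Or.inr (Or.inl h)

theorem pvHC_val1 (layer : List (List Int)) (n m : Nat) {r c i j : Nat}
    (h : (PySem.Int.toChars (pvAt layer r c)).length ≠ 2 ∧ i = 2*r+1 ∧ j = 7*c+4) :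
    pvHC layer n m r c i j := by
  unfold pvHC; exact Or.inr (Or.inr h)

-- a text position no cell writes holds a space
theorem pvE_space (layer : List (List Int)) (n m i j : Nat) (hn : 1 ≤ n) (hm : 1 ≤ m)
    (hi : i ≤ 2*n) (hj : j ≤ 7*m)
    (h : ¬ ∃ r ∈ List.range n, ∃ c ∈ List.range m, pvHC layer n m r c i j) :
    pvE layer n m i j = [' '] := by
  have hW : ∀ r c, r < n → c < m → pvHC layer n m r c i j → False := fun r c hr hc hhc =>
    h ⟨r, List.mem_range.mpr hr, c, List.mem_range.mpr hc, hhc⟩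
  by_cases hjm : j = 7*m
  · exfalso
    by_cases h2 : i/2 < n
    · exact hW (i/2) (m-1) h2 (by omega)
        (pvHC_right layer n m ⟨rfl, by omega, by omega⟩)
    · exact hW (n-1) (m-1) (by omega) (by omega)
        (pvHC_right layer n m ⟨rfl, by omega, by omega⟩)
  · have hj' : j < 7*m := by omega
    have hcm : j/7 < m := by omega
    by_cases hpar : i % 2 = 0
    · -- separator row
      rw [show i = 2*(i/2) from by omega]
      by_cases hk0 : j % 7 = 0
      · -- corner column
        rw [show j = 7*(j/7) from by omega, pvE_even_corner layer n m (i/2) (j/7) hcm]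
        by_cases hc0 : j/7 = 0
        · exfalso
          by_cases h2 : i/2 < n
          · exact hW (i/2) (j/7) h2 hcm
              (pvHC_left layer n m ⟨Or.inl hc0, by omega, by omega⟩)
          · exact hW (n-1) (j/7) (by omega) hcm
              (pvHC_left layer n m ⟨Or.inl hc0, by omega, by omega⟩)
        · rw [if_neg hc0]
          by_cases hr0 : i/2 = 0
          · exfalso
            by_cases he : pvAt layer 0 (j/7) = pvAt layer 0 (j/7-1)
            · exact hW 0 (j/7) (by omega) hcm
                (pvHC_tl0 layer n m ⟨hc0, rfl, he, by omega, by omega⟩)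
            · exact hW 0 (j/7) (by omega) hcm
                (pvHC_left layer n m ⟨Or.inr he, by omega, by omega⟩)
          · rw [if_neg hr0]
            by_cases hrn : i/2 = n
            · rw [if_pos hrn]
              exfalso
              by_cases he : pvAt layer (n-1) (j/7) = pvAt layer (n-1) (j/7-1)
              · exact hW (n-1) (j/7) (by omega) hcm
                  (pvHC_bl layer n m ⟨hc0, rfl, he, by omega, by omega⟩)
              · exact hW (n-1) (j/7) (by omega) hcm
                  (pvHC_left layer n m ⟨Or.inr he, by omega, by omega⟩)
            · rw [if_neg hrn]
              exfalso
              by_cases hb : pvAt layer (i/2) (j/7) = pvAt layer (i/2) (j/7-1) ∧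
                  pvAt layer (i/2-1) (j/7) = pvAt layer (i/2-1) (j/7-1)
              · exact hW (i/2) (j/7) (by omega) hcm
                  (pvHC_tl layer n m ⟨hc0, hr0, hb.1, hb.2, by omega, by omega⟩)
              · by_cases he : pvAt layer (i/2) (j/7) = pvAt layer (i/2) (j/7-1)
                · have he2 : pvAt layer (i/2-1) (j/7) ≠ pvAt layer (i/2-1) (j/7-1) := by tauto
                  exact hW (i/2-1) (j/7) (by omega) hcm
                    (pvHC_left layer n m ⟨Or.inr he2, by omega, by omega⟩)
                · exact hW (i/2) (j/7) (by omega) hcm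
                    (pvHC_left layer n m ⟨Or.inr he, by omega, by omega⟩)
      · -- fill column
        rw [show j = 7*(j/7) + j%7 from by omega,
            pvE_even_fill layer n m (i/2) (j/7) (j%7) (by omega) (by omega)]
        by_cases hr0 : i/2 = 0
        · exfalso
          exact hW 0 (j/7) (by omega) hcm
            (pvHC_top layer n m ⟨Or.inl rfl, by omega, by omega, by omega⟩)
        · by_cases hrn : i/2 = n
          · exfalso
            exact hW (n-1) (j/7) (by omega) hcm
              (pvHC_bottom layer n m ⟨Or.inl rfl, by omega, by omega, by omega⟩)
          · rw [if_neg (by omega : ¬ (i/2 = 0 ∨ i/2 = n))]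
            by_cases he : pvAt layer (i/2) (j/7) = pvAt layer (i/2-1) (j/7)
            · rw [if_pos he]
            · exfalso
              exact hW (i/2) (j/7) (by omega) hcm
                (pvHC_top layer n m ⟨Or.inr he, by omega, by omega, by omega⟩)
    · -- content row
      have hodd : i = 2*(i/2)+1 := by omega
      have hrn : i/2 < n := by omega
      rw [hodd]
      by_cases hk0 : j % 7 = 0
      · rw [show j = 7*(j/7) from by omega, pvE_odd_corner layer n m (i/2) (j/7) hcm]
        by_cases hcd : j/7 = 0 ∨ pvAt layer (i/2) (j/7) ≠ pvAt layer (i/2) (j/7-1)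
        · exfalso
          exact hW (i/2) (j/7) hrn hcm
            (pvHC_left layer n m ⟨hcd, by omega, by omega⟩)
        · rw [if_neg hcd]
      · by_cases hk3 : j % 7 = 3
        · rw [show j = 7*(j/7) + 3 from by omega, pvE_odd_3 layer n m (i/2) (j/7)]
          by_cases h2 : (PySem.Int.toChars (pvAt layer (i/2) (j/7))).length = 2
          · exfalso
            exact hW (i/2) (j/7) hrn hcm
              (pvHC_val2 layer n m ⟨h2, by omega, Or.inl (by omega)⟩)
          · rw [if_neg h2]
        · by_cases hk4 : j % 7 = 4
          · exfalso
            by_cases h2 : (PySem.Int.toChars (pvAt layer (i/2) (j/7))).length = 2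
            · exact hW (i/2) (j/7) hrn hcm
                (pvHC_val2 layer n m ⟨h2, by omega, Or.inr (by omega)⟩)
            · exact hW (i/2) (j/7) hrn hcm
                (pvHC_val1 layer n m ⟨h2, by omega, by omega⟩)
          · rw [show j = 7*(j/7) + j%7 from by omega,
                pvE_odd_other layer n m (i/2) (j/7) (j%7) (by omega) (by omega) hk3 hk4]


-- the final grid agrees with pvE everywhere in range
theorem pvGrid_eq (layer : List (List Int)) (n m i j : Nat) (hn : 1 ≤ n) (hm : 1 ≤ m)
    (hi : i ≤ 2*n) (hj : j ≤ 7*m) :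
    ((List.range n).foldl (fun g r => (List.range m).foldl (fun g c => pvCellA layer n m r c g) g)
      (fun _ _ => [' '])) i j = pvE layer n m i j := by
  have hin : ∀ r ∈ List.range n,
      pvWrites (fun g => (List.range m).foldl (fun g c => pvCellA layer n m r c g) g)
        (∃ c ∈ List.range m, pvHC layer n m r c i j) (pvE layer n m i j) i j := by
    intro r hr
    exact pvWrites_fold (fun c => pvCellA layer n m r c) (fun c => pvHC layer n m r c i j)
      (fun c hc => pvWrites_cellA layer n m r c i j (List.mem_range.mp hr) (List.mem_range.mp hc))
  have hout := pvWrites_fold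
      (fun r g => (List.range m).foldl (fun g c => pvCellA layer n m r c g) g)
      (fun r => ∃ c ∈ List.range m, pvHC layer n m r c i j) hin
  by_cases hhit : ∃ r ∈ List.range n, ∃ c ∈ List.range m, pvHC layer n m r c i j
  · exact hout.1 _ hhit
  · exact (hout.2 _ hhit).trans (pvE_space layer n m i j hn hm hi hj hhit).symm

-- generic list plumbing
theorem pvflatMap_congr {α : Type} (l : List Nat) {f f' : Nat → List α}
    (h : ∀ x ∈ l, f x = f' x) : l.flatMap f = l.flatMap f' := by
  induction l with
  | nil => rfl
  | cons a t ih =>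
    rw [List.flatMap_cons, List.flatMap_cons, h a List.mem_cons_self,
        ih (fun x hx => h x (List.mem_cons_of_mem _ hx))]

theorem pvjoin (ls : List (List Char)) (hne : ls ≠ []) :
    List.intercalate ['\n'] ls ++ ['\n'] = ls.flatMap (fun l => l ++ ['\n']) := by
  induction ls with
  | nil => exact absurd rfl hne
  | cons x t ih =>
    cases t with
    | nil => simp [List.intercalate]
    | cons y t' =>
      have h2 : List.intercalate ['\n'] (x :: y :: t') =
          x ++ ['\n'] ++ List.intercalate ['\n'] (y :: t') := by
        simp [List.intercalate, List.intersperse]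
      rw [h2, List.flatMap_cons, List.append_assoc, List.append_assoc, ih (by simp)]
      simp

theorem pvgroup2 {α : Type} (f : Nat → List α) (n : Nat) :
    (List.range (2*n+1)).flatMap f
      = (List.range n).flatMap (fun r => f (2*r) ++ f (2*r+1)) ++ f (2*n) := by
  induction n with
  | zero => simp
  | succ t ih =>
    rw [show 2*(t+1)+1 = (2*t+2)+1 from by ring,
        List.range_succ (n := 2*t+2), List.range_succ (n := 2*t+1),
        List.flatMap_append, List.flatMap_append, ih,
        List.range_succ (n := t), List.flatMap_append]
    simp only [List.flatMap_cons, List.flatMap_nil, List.append_nil, List.append_assoc]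
    rw [show 2*t+2 = 2*(t+1) from by ring]

theorem pvgroup7 {α : Type} (f : Nat → List α) (m : Nat) :
    (List.range (7*m+1)).flatMap f
      = (List.range m).flatMap (fun c =>
          f (7*c) ++ f (7*c+1) ++ f (7*c+2) ++ f (7*c+3) ++ f (7*c+4) ++ f (7*c+5) ++ f (7*c+6))
        ++ f (7*m) := by
  induction m with
  | zero => simp
  | succ t ih =>
    rw [show 7*(t+1)+1 = (7*t+7)+1 from by ring,
        List.range_succ (n := 7*t+7), List.range_succ (n := 7*t+6),
        List.range_succ (n := 7*t+5), List.range_succ (n := 7*t+4),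
        List.range_succ (n := 7*t+3), List.range_succ (n := 7*t+2),
        List.range_succ (n := 7*t+1),
        List.flatMap_append, List.flatMap_append, List.flatMap_append, List.flatMap_append,
        List.flatMap_append, List.flatMap_append, List.flatMap_append, ih,
        List.range_succ (n := t), List.flatMap_append]
    simp only [List.flatMap_cons, List.flatMap_nil, List.append_nil, List.append_assoc]
    rw [show 7*t+7 = 7*(t+1) from by ring]


theorem pvfoldl_line (A B : Nat → List Char) (L : List Nat) (acc : List Char) :
    L.foldl (fun line c => line ++ A c ++ B c) acc = acc ++ L.flatMap (fun c => A c ++ B c) := by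
  induction L generalizing acc with
  | nil => simp
  | cons a t ih => rw [List.foldl_cons, ih, List.flatMap_cons]; simp [List.append_assoc]

theorem pvflatMap_pairs (f : List Char → List Char) (Af Bf : Nat → List Char) (L : List Nat) :
    (L.flatMap (fun r => [Af r, Bf r])).flatMap f = L.flatMap (fun r => f (Af r) ++ f (Bf r)) := by
  induction L with
  | nil => rfl
  | cons a t ih => simp [ih]

-- each of B's lines is the corresponding row of pvE
theorem pvSepRow (layer : List (List Int)) (n m r : Nat) (hr : r < n) :
    pvSepLine layer m r ++ ['*'] = (List.range (7*m+1)).flatMap (pvE layer n m (2*r)) := by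
  rw [pvgroup7 (pvE layer n m (2*r)) m, pvE_border]
  congr 1
  unfold pvSepLine
  rw [pvfoldl_line]
  rw [List.nil_append]
  apply pvflatMap_congr
  intro c hc
  have hcm := List.mem_range.mp hc
  have hrn : ¬ r = n := by omega
  rw [pvE_even_corner layer n m r c hcm,
      pvE_even_fill layer n m r c 1 (by omega) (by omega),
      pvE_even_fill layer n m r c 2 (by omega) (by omega),
      pvE_even_fill layer n m r c 3 (by omega) (by omega),
      pvE_even_fill layer n m r c 4 (by omega) (by omega),
      pvE_even_fill layer n m r c 5 (by omega) (by omega),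
      pvE_even_fill layer n m r c 6 (by omega) (by omega)]
  by_cases hc0 : c = 0 <;> by_cases hr0 : r = 0 <;>
    by_cases he1 : pvAt layer r c = pvAt layer r (c-1) <;>
    by_cases he0 : pvAt layer (r-1) c = pvAt layer (r-1) (c-1) <;>
    by_cases hd : pvAt layer r c = pvAt layer (r-1) c <;>
    simp_all

theorem pvContentRow (layer : List (List Int)) (n m r : Nat) :
    pvContentLine layer m r ++ ['*'] = (List.range (7*m+1)).flatMap (pvE layer n m (2*r+1)) := by
  rw [pvgroup7 (pvE layer n m (2*r+1)) m, pvE_border]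
  congr 1
  unfold pvContentLine
  rw [pvfoldl_line]
  rw [List.nil_append]
  apply pvflatMap_congr
  intro c hc
  have hcm := List.mem_range.mp hc
  rw [pvE_odd_corner layer n m r c hcm,
      pvE_odd_other layer n m r c 1 (by omega) (by omega) (by omega) (by omega),
      pvE_odd_other layer n m r c 2 (by omega) (by omega) (by omega) (by omega),
      pvE_odd_3 layer n m r c, pvE_odd_4 layer n m r c,
      pvE_odd_other layer n m r c 5 (by omega) (by omega) (by omega) (by omega),
      pvE_odd_other layer n m r c 6 (by omega) (by omega) (by omega) (by omega)]
  have hcor : (if c == 0 || pvAt layer r c != pvAt layer r (c-1) then (['*'] : List Char) else [' '])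
      = (if c = 0 ∨ pvAt layer r c ≠ pvAt layer r (c-1) then ['*'] else [' ']) := by
    by_cases hcd : c = 0 ∨ pvAt layer r c ≠ pvAt layer r (c-1)
    · rw [if_pos (by simpa using hcd), if_pos hcd]
    · rw [if_neg (by simpa using hcd), if_neg hcd]
  rw [hcor]
  by_cases h2 : (PySem.Int.toChars (pvAt layer r c)).length = 2
  · obtain ⟨a, b, hab⟩ := List.length_eq_two.mp h2
    rw [if_pos (by simpa using h2 : ((PySem.Int.toChars (pvAt layer r c)).length == 2) = true),
        if_pos h2, if_pos h2, hab]
    simp [List.append_assoc]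
  · rw [if_neg (by simpa using h2 : ¬ ((PySem.Int.toChars (pvAt layer r c)).length == 2) = true),
        if_neg h2, if_neg h2]
    simp [List.append_assoc]

theorem pvBottomRow (layer : List (List Int)) (n m : Nat) (hn : 1 ≤ n) :
    pvBottomLine layer n m ++ ['*'] = (List.range (7*m+1)).flatMap (pvE layer n m (2*n)) := by
  rw [pvgroup7 (pvE layer n m (2*n)) m, pvE_border]
  congr 1
  unfold pvBottomLine
  rw [pvfoldl_line]
  rw [List.nil_append]
  apply pvflatMap_congr
  intro c hc
  have hcm := List.mem_range.mp hc
  rw [pvE_even_corner layer n m n c hcm,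
      pvE_even_fill layer n m n c 1 (by omega) (by omega),
      pvE_even_fill layer n m n c 2 (by omega) (by omega),
      pvE_even_fill layer n m n c 3 (by omega) (by omega),
      pvE_even_fill layer n m n c 4 (by omega) (by omega),
      pvE_even_fill layer n m n c 5 (by omega) (by omega),
      pvE_even_fill layer n m n c 6 (by omega) (by omega)]
  rw [if_pos (Or.inr rfl : n = 0 ∨ n = n)]
  by_cases hc0 : c = 0
  · rw [if_pos hc0]
    rw [if_pos (by simpa using Or.inl hc0 :
      (c == 0 || pvAt layer (n-1) c != pvAt layer (n-1) (c-1)) = true)]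
    decide
  · rw [if_neg hc0, if_neg (by omega : ¬ n = 0), if_pos rfl]
    by_cases he : pvAt layer (n-1) c = pvAt layer (n-1) (c-1)
    · rw [if_pos he,
          if_neg (by simpa using (by tauto : ¬ (c = 0 ∨ pvAt layer (n-1) c ≠ pvAt layer (n-1) (c-1))) :
            ¬ (c == 0 || pvAt layer (n-1) c != pvAt layer (n-1) (c-1)) = true)]
      decide
    · rw [if_neg he,
          if_pos (by simpa using (Or.inr he : c = 0 ∨ pvAt layer (n-1) c ≠ pvAt layer (n-1) (c-1)))]
      decide

-- A's readback, with the grid replaced by pvE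
theorem pvAssembleA (layer : List (List Int)) (n m : Nat) (g : Nat → Nat → List Char)
    (hg : ∀ i, i ≤ 2*n → ∀ j, j ≤ 7*m → g i j = pvE layer n m i j) :
    (List.range (2*n+1)).foldl (fun acc i =>
      ((List.range (7*m+1)).foldl (fun acc j => acc ++ g i j) acc) ++ ['\n']) []
    = (List.range (2*n+1)).flatMap
        (fun i => (List.range (7*m+1)).flatMap (pvE layer n m i) ++ ['\n']) := by
  have hbody : (fun (acc : List Char) i =>
        ((List.range (7*m+1)).foldl (fun acc j => acc ++ g i j) acc) ++ ['\n'])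
      = fun acc i => acc ++ ((List.range (7*m+1)).flatMap (g i) ++ ['\n']) := by
    funext acc i
    rw [PySem.List.foldl_append_eq_flatMap, List.append_assoc]
  rw [hbody, PySem.List.foldl_append_eq_flatMap, List.nil_append]
  apply pvflatMap_congr
  intro i hi
  congr 1
  apply pvflatMap_congr
  intro j hj
  exact hg i (by have := List.mem_range.mp hi; omega) j (by have := List.mem_range.mp hj; omega)

theorem pvMain (layer : List (List Int)) (hne : layer ≠ [])
    (hm1 : 1 ≤ (layer.headD []).length) :
    visualize_layer layer = visualize_layer_alt layer := by
  have hn1 : 1 ≤ layer.length := by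
    cases layer with
    | nil => exact absurd rfl hne
    | cons a t => simp
  simp only [visualize_layer, visualize_layer_alt]
  refine congrArg String.ofList ?_
  rw [pvAssembleA layer layer.length (layer.headD []).length _
        (fun i hi j hj => pvGrid_eq layer layer.length (layer.headD []).length i j hn1 hm1 hi hj),
      PySem.List.foldl_append_eq_flatMap, List.nil_append,
      pvjoin _ (by simp), List.flatMap_append, pvflatMap_pairs,
      pvgroup2 (fun i => (List.range (7*(layer.headD []).length+1)).flatMap
        (pvE layer layer.length (layer.headD []).length i) ++ ['\n']) layer.length]
  simp only [List.flatMap_cons, List.flatMap_nil, List.append_nil]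
  refine congrArg₂ (fun a b => a ++ b) ?_ ?_
  · refine pvflatMap_congr _ (fun r hr => ?_)
    rw [← pvSepRow layer layer.length (layer.headD []).length r (List.mem_range.mp hr),
        ← pvContentRow layer layer.length (layer.headD []).length r]
    try simp [List.append_assoc]
  · rw [← pvBottomRow layer layer.length (layer.headD []).length hn1]
    try simp [List.append_assoc]

-- ===== VERDICT (by name: the statement is the Claim_ definition above) =====
theorem visualize_layer_spec : Claim_equal_visualize_layer := by
  intro layer _hdom hpre
  obtain ⟨hne, hm1, _⟩ := hpre
  unfold Spec_visualize_layer
  exact pvMain layer hne hm1
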